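-- pv_equiv track=rewrite | github.com/IlMorgoz/Esercitazione-verifica1 | Esercizio1_maselli_morgan.py | competizione_con_meno_giudici
-- ===== SOURCE A (Python) =====
-- def competizione_con_meno_giudici(tupla):
--     minore=[]
--     judges=[]
--     for chef,piatto,punteggio,giudici in tupla:
--         judges.append(giudici)
--     minimo=min(judges)
--     for chef,piatto,punteggio,giudici in tupla:
--         if giudici==minimo:
--             minore.append((chef,piatto,punteggio,giudici))
--     return tuple(minore)
-- ===== SOURCE B (Python) =====
-- def competizione_con_meno_giudici(tupla):
--     # single pass: track current minimum judge count and the matching tuples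
--     minore = []
--     minimo = None
--     for t in tupla:
--         giudici = t[3]
--         if minimo is None or giudici < minimo:
--             minimo = giudici
--             minore = [t]
--         elif giudici == minimo:
--             minore.append(t)
--     return tuple(minore)
-- ===== Notes on version B (the rewrite author's own statement) =====
-- stated objective: alternative
-- what changed: B replaces A's three passes (collect all judge counts into a list, min() over it, then a second filtering scan) by one single-pass loop maintaining the running minimum and the accumulated winners; Pre_ excludes the empty list, on which A's min() raises ValueError while B naturally returns ().
-- outside the precondition, e.g. on competizione_con_meno_giudici([]): A raises ValueError, B returns ()
import Mathlib
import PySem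

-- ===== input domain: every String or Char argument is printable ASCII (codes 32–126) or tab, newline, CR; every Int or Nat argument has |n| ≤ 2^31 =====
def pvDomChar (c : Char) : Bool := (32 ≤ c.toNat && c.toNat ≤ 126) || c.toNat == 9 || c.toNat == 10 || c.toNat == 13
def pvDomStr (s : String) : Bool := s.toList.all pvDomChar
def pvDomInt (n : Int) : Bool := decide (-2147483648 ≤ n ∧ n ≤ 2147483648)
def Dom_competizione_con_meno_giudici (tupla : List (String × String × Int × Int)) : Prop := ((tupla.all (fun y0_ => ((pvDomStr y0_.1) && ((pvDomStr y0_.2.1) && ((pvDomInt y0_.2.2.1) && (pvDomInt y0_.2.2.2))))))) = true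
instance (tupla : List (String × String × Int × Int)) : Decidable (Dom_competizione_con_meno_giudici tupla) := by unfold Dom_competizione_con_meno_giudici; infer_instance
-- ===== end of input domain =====

-- B replaces A's three passes (build judges list, min() over it, second filtering scan) by one
-- single-pass loop keeping the running minimum (None until the first tuple) and the accumulated winners.


-- ===== PORT A =====
def competizione_con_meno_giudici (tupla : List (String × String × Int × Int)) : List (String × String × Int × Int) :=
  -- judges.append(giudici) loop
  let judges : List Int := tupla.foldl (fun acc t => acc ++ [t.2.2.2]) []
  -- minimo = min(judges); min([]) raises ValueError → min? = none, excluded by Pre_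
  match PySem.List.min? judges (fun x => x) with
  | none => []
  | some minimo =>
      -- second scan: minore.append((chef,piatto,punteggio,giudici)) when giudici == minimo
      tupla.foldl (fun acc t => if t.2.2.2 = minimo then acc ++ [t] else acc) []

-- ===== PORT B =====
-- one step of B's single-pass loop: first tuple (minimo is None) or a new strict minimum resets,
-- a tie appends, otherwise skip
def pvStepB (s : List (String × String × Int × Int) × Option Int) (t : String × String × Int × Int) :
    List (String × String × Int × Int) × Option Int :=
  match s.2 with
  | none => ([t], some t.2.2.2)
  | some m =>
      if t.2.2.2 < m then ([t], some t.2.2.2)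
      else if t.2.2.2 = m then (s.1 ++ [t], some m)
      else s

def competizione_con_meno_giudici_alt (tupla : List (String × String × Int × Int)) : List (String × String × Int × Int) :=
  (tupla.foldl pvStepB ([], none)).1

-- ===== PRECONDITION & SPEC =====
-- Python A raises ValueError (min of an empty sequence) on the empty list; Pre_ excludes exactly that input.
def Pre_competizione_con_meno_giudici (tupla : List (String × String × Int × Int)) : Prop := tupla ≠ []
instance (tupla : List (String × String × Int × Int)) : Decidable (Pre_competizione_con_meno_giudici tupla) := by unfold Pre_competizione_con_meno_giudici; infer_instance
def pvWitness_competizione_con_meno_giudici : (List (String × String × Int × Int)) := [("anna", "pasta", 7, 3), ("bob", "pizza", 9, 2), ("carla", "riso", 6, 2)]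

def Spec_competizione_con_meno_giudici (tupla : List (String × String × Int × Int)) (out : List (String × String × Int × Int)) : Prop := out = competizione_con_meno_giudici_alt tupla
instance (tupla : List (String × String × Int × Int)) (out : List (String × String × Int × Int)) : Decidable (Spec_competizione_con_meno_giudici tupla out) := by unfold Spec_competizione_con_meno_giudici; infer_instance

-- ===== CLAIM (what is proved, stated in full; the proofs are below) =====
def Claim_equal_competizione_con_meno_giudici : Prop := ∀ (tupla : List (String × String × Int × Int)), Dom_competizione_con_meno_giudici tupla → Pre_competizione_con_meno_giudici tupla → Spec_competizione_con_meno_giudici tupla (competizione_con_meno_giudici tupla)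

-- ===== LEMMAS AND PROOFS =====

-- running minimum of the judge counts, seeded with m
def pvMinJ (l : List (String × String × Int × Int)) (m : Int) : Int :=
  l.foldl (fun a t => min a t.2.2.2) m

theorem pvMinJ_cons (t : String × String × Int × Int) (l : List (String × String × Int × Int)) (m : Int) :
    pvMinJ (t :: l) m = pvMinJ l (min m t.2.2.2) := rfl

theorem pvMinJ_le (l : List (String × String × Int × Int)) (m : Int) : pvMinJ l m ≤ m := by
  induction l generalizing m with
  | nil => simp [pvMinJ]
  | cons t l ih =>
      have := ih (min m t.2.2.2)
      rw [pvMinJ_cons]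
      exact le_trans this (min_le_left _ _)

-- invariant of B's loop: starting from accumulator acc with running minimum some m,
-- the loop ends with minimum pvMinJ l m, accumulator = acc (kept iff m survives) ++ ties of l
theorem pvStepB_loop (l : List (String × String × Int × Int))
    (acc : List (String × String × Int × Int)) (m : Int) :
    l.foldl pvStepB (acc, some m) =
      ((if m ≤ pvMinJ l m then acc else []) ++ l.filter (fun t => t.2.2.2 == pvMinJ l m),
       some (pvMinJ l m)) := by
  induction l generalizing acc m with
  | nil => simp [pvMinJ]
  | cons t l ih =>
      rw [List.foldl_cons, pvMinJ_cons]
      by_cases hlt : t.2.2.2 < m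
      · have hmin : min m t.2.2.2 = t.2.2.2 := by omega
        rw [hmin]
        have hstep : pvStepB (acc, some m) t = ([t], some t.2.2.2) := by
          simp [pvStepB, hlt]
        rw [hstep, ih]
        have hle2 := pvMinJ_le l t.2.2.2
        have hnot : ¬ m ≤ pvMinJ l t.2.2.2 := by omega
        rw [if_neg hnot]
        by_cases heq : t.2.2.2 ≤ pvMinJ l t.2.2.2
        · have : t.2.2.2 = pvMinJ l t.2.2.2 := by omega
          simp [← this]
        · have : ¬ (t.2.2.2 = pvMinJ l t.2.2.2) := by omega
          simp [this]
          omega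
      · by_cases heq : t.2.2.2 = m
        · have hmin : min m t.2.2.2 = m := by omega
          rw [hmin]
          have hstep : pvStepB (acc, some m) t = (acc ++ [t], some m) := by
            simp [pvStepB, hlt, heq]
          rw [hstep, ih]
          have hle2 := pvMinJ_le l m
          by_cases hsur : m ≤ pvMinJ l m
          · have : m = pvMinJ l m := by omega
            simp [hsur, List.filter_cons, heq, ← this]
          · have : ¬ (t.2.2.2 = pvMinJ l m) := by omega
            simp [hsur, List.filter_cons, this]
        · -- skip: t.2.2.2 > m
          have hmin : min m t.2.2.2 = m := by omega
          rw [hmin]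
          have hstep : pvStepB (acc, some m) t = (acc, some m) := by
            simp [pvStepB, hlt, heq]
          rw [hstep, ih]
          have hle2 := pvMinJ_le l m
          have : ¬ (t.2.2.2 = pvMinJ l m) := by omega
          simp [List.filter_cons, this]

-- A's judges-collecting loop is the map of the judge component
theorem pvJudges_eq (l : List (String × String × Int × Int)) (acc : List Int) :
    l.foldl (fun acc t => acc ++ [t.2.2.2]) acc = acc ++ l.map (fun t => t.2.2.2) := by
  induction l generalizing acc with
  | nil => simp
  | cons t l ih => simp [ih]

-- A's filtering loop is List.filter
theorem pvFilter_eq (l : List (String × String × Int × Int)) (m : Int)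
    (acc : List (String × String × Int × Int)) :
    l.foldl (fun acc t => if t.2.2.2 = m then acc ++ [t] else acc) acc =
      acc ++ l.filter (fun t => t.2.2.2 == m) := by
  induction l generalizing acc with
  | nil => simp
  | cons t l ih =>
      by_cases h : t.2.2.2 = m <;> simp [List.filter_cons, h, ih]

theorem foldl_min_map (l : List (String × String × Int × Int)) (m : Int) :
    (l.map (fun t => t.2.2.2)).foldl min m = pvMinJ l m := by
  simp [pvMinJ, List.foldl_map]

-- ===== VERDICT (by name: the statements are the Claim_ definitions above) =====
theorem competizione_con_meno_giudici_spec : Claim_equal_competizione_con_meno_giudici := by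
  intro tupla _ hpre
  unfold Spec_competizione_con_meno_giudici
  match tupla with
  | [] => exact absurd rfl hpre
  | x :: rest =>
      unfold competizione_con_meno_giudici competizione_con_meno_giudici_alt
      rw [pvJudges_eq]
      simp only [List.nil_append, List.map_cons]
      rw [PySem.List.min?_id_cons, foldl_min_map]
      have hmatch : (match some (pvMinJ rest x.2.2.2) with
          | none => ([] : List (String × String × Int × Int))
          | some minimo => List.foldl (fun acc t => if t.2.2.2 = minimo then acc ++ [t] else acc) [] (x :: rest)) =
          List.foldl (fun acc t => if t.2.2.2 = pvMinJ rest x.2.2.2 then acc ++ [t] else acc) [] (x :: rest) := rfl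
      rw [hmatch, pvFilter_eq]
      rw [List.foldl_cons]
      have hstep : pvStepB ([], none) x = ([x], some x.2.2.2) := by simp [pvStepB]
      rw [hstep, pvStepB_loop rest [x] x.2.2.2]
      have hle := pvMinJ_le rest x.2.2.2
      by_cases hsur : x.2.2.2 ≤ pvMinJ rest x.2.2.2
      · have : x.2.2.2 = pvMinJ rest x.2.2.2 := by omega
        simp [← this]
      · have : ¬ (x.2.2.2 = pvMinJ rest x.2.2.2) := by omega
        simp [hsur, this]
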